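-- pv_equiv track=rewrite | github.com/Nishanka06/playfair-cipher | decrypt_and_clean.py | heuristic_clean
-- ===== SOURCE A (Python) =====
-- def heuristic_clean(text: str) -> str:
--     """
--     Heuristic cleaning:
--     - remove trailing single 'X' if it was likely a padding
--     - collapse patterns A X A -> A A (i.e., remove X inserted between identical letters)
--     This tries to preserve legitimate X where possible.
--     """
--     if not text:
--         return text
--
--     # 1) remove trailing X (common padding)
--     if text.endswith('X'):
--         text = text[:-1]
--
--     # 2) collapse A X A -> AA
--     out_chars = []
--     i = 0
--     n = len(text)
--     while i < n:
--         # check pattern char, 'X', same char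
--         if i + 2 < n and text[i+1] == 'X' and text[i] == text[i+2]:
--             out_chars.append(text[i])  # keep one occurrence
--             i += 3  # skip the pattern A X A
--         else:
--             out_chars.append(text[i])
--             i += 1
--
--     return ''.join(out_chars)
-- ===== SOURCE B (Python) =====
-- def heuristic_clean(text: str) -> str:
--     # One-pass state machine over the characters (pending buffer of at most 'a' or 'a','X')
--     # instead of A's index loop with lookahead; same result, alternative structure.
--     if not text:
--         return text
--     if text.endswith('X'):
--         text = text[:-1]
--     out = []
--     pend = []  # [] | [a] | [a, 'X'] : chars read but not yet decided
--     for c in text: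
--         if not pend:
--             pend = [c]
--         elif len(pend) == 1:
--             if c == 'X':
--                 pend.append('X')
--             else:
--                 out.append(pend[0])
--                 pend = [c]
--         else:  # pend == [a, 'X']
--             a = pend[0]
--             if c == a:
--                 out.append(a)       # collapse a X a -> a
--                 pend = []
--             elif c == 'X':
--                 out.append(a)
--                 pend = ['X', 'X']
--             else:
--                 out.append(a)
--                 out.append('X')
--                 pend = [c]
--     out.extend(pend)
--     return ''.join(out)
-- ===== Notes on version B (the rewrite author's own statement) =====
-- stated objective: alternative
-- what changed: Replaces A's index-based while loop with two-ahead indexing (text[i+1], text[i+2], i+=3 skips) by a single forward pass over the characters driven by a small state machine holding a pending buffer of at most two characters.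
import Mathlib
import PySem

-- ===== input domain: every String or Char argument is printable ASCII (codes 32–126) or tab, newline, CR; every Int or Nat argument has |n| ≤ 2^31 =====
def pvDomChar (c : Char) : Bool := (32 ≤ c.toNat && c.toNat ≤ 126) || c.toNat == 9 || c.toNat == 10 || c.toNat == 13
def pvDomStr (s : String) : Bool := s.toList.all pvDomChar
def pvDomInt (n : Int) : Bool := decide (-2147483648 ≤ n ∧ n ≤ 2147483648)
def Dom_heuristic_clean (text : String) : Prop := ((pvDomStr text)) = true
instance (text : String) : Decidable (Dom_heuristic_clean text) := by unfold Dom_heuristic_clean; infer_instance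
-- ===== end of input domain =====

-- B replaces A's index loop (with i+=3 lookahead skips) by a one-pass state machine
-- with a two-character pending buffer; alternative structure, same O(n) result.

-- ===== PORT A =====
-- A's while loop: index i, lookahead text[i+1], text[i+2], skip 3 on a match.
def hcLoopA (t : List Char) (i : Nat) (acc : List Char) : List Char :=
  if i < t.length then
    if i + 2 < t.length ∧ PySem.List.pyGetD t ((i : Int) + 1) ' ' = 'X'
        ∧ PySem.List.pyGetD t (i : Int) ' ' = PySem.List.pyGetD t ((i : Int) + 2) ' ' then
      hcLoopA t (i + 3) (acc ++ [PySem.List.pyGetD t (i : Int) ' '])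
    else
      hcLoopA t (i + 1) (acc ++ [PySem.List.pyGetD t (i : Int) ' '])
  else acc
termination_by t.length - i

def heuristic_clean (text : String) : String :=
  if text = "" then text
  else
    let t := if PySem.Str.endswith text "X" then PySem.Str.slice text none (some (-1)) else text
    String.ofList (hcLoopA t.toList 0 [])

-- ===== PORT B =====
-- B's state machine step: pend is [] | [a] | [a,'X'].
def hcStep (st : List Char × List Char) (c : Char) : List Char × List Char :=
  match st with
  | (out, []) => (out, [c])
  | (out, [a]) => if c = 'X' then (out, [a, 'X']) else (out ++ [a], [c])
  | (out, a :: _) =>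
      if c = a then (out ++ [a], [])
      else if c = 'X' then (out ++ [a], ['X', 'X'])
      else (out ++ [a, 'X'], [c])

def heuristic_clean_alt (text : String) : String :=
  if text = "" then text
  else
    let t := if PySem.Str.endswith text "X" then PySem.Str.slice text none (some (-1)) else text
    let st := t.toList.foldl hcStep ([], [])
    String.ofList (st.1 ++ st.2)

-- ===== PRECONDITION & SPEC =====
def Spec_heuristic_clean (text : String) (out : String) : Prop := out = heuristic_clean_alt text
instance (text : String) (out : String) : Decidable (Spec_heuristic_clean text out) := by unfold Spec_heuristic_clean; infer_instance

-- ===== CLAIM (what is proved, stated in full; the proofs are below) =====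
def Claim_equal_heuristic_clean : Prop := ∀ (text : String), Dom_heuristic_clean text → Spec_heuristic_clean text (heuristic_clean text)

-- ===== LEMMAS AND PROOFS =====

-- the common value both loops compute: leftmost non-overlapping collapse of a X a -> a
def gcol : List Char → List Char
  | a :: x :: b :: rest => if x = 'X' ∧ a = b then a :: gcol rest else a :: gcol (x :: b :: rest)
  | s => s
termination_by s => s.length
decreasing_by all_goals (simp; try omega)

lemma gcol_cons_ne (a x : Char) (s : List Char) (h : x ≠ 'X') :
    gcol (a :: x :: s) = a :: gcol (x :: s) := by
  cases s with
  | nil => simp [gcol]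
  | cons b rest => simp [gcol, h]

lemma gcol_collapse (a : Char) (s : List Char) : gcol (a :: 'X' :: a :: s) = a :: gcol s := by
  simp [gcol]

lemma gcol_short (s : List Char) (h : s.length ≤ 2) : gcol s = s := by
  match s with
  | [] => simp [gcol]
  | [a] => simp [gcol]
  | [a, b] => simp [gcol]
  | a :: b :: c :: rest => simp at h

lemma hcLoopA_eq (t : List Char) :
    ∀ d i acc, t.length - i ≤ d → hcLoopA t i acc = acc ++ gcol (t.drop i) := by
  intro d
  induction d with
  | zero =>
    intro i acc h
    rw [hcLoopA]
    have hge : ¬ i < t.length := by omega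
    rw [if_neg hge, List.drop_eq_nil_of_le (by omega)]
    simp [gcol]
  | succ d ih =>
    intro i acc h
    by_cases hi : i < t.length
    · have e1 : ((i : Int) + 1) = ((i + 1 : Nat) : Int) := by push_cast; ring
      have e2 : ((i : Int) + 2) = ((i + 2 : Nat) : Int) := by push_cast; ring
      rw [hcLoopA, if_pos hi]
      simp only [e1, e2, PySem.List.pyGetD_natCast]
      have hd1 : t.drop i = t[i] :: t.drop (i + 1) := List.drop_eq_getElem_cons hi
      have hgi : t.getD i ' ' = t[i] := List.getD_eq_getElem t ' ' hi
      by_cases h2 : i + 2 < t.length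
      · have hi1 : i + 1 < t.length := by omega
        have hg1 : t.getD (i + 1) ' ' = t[i + 1] := List.getD_eq_getElem t ' ' hi1
        have hg2 : t.getD (i + 2) ' ' = t[i + 2] := List.getD_eq_getElem t ' ' h2
        have hd2 : t.drop (i + 1) = t[i + 1] :: t.drop (i + 2) := List.drop_eq_getElem_cons hi1
        have hd3 : t.drop (i + 2) = t[i + 2] :: t.drop (i + 3) := List.drop_eq_getElem_cons h2
        by_cases hcond : t[i + 1] = 'X' ∧ t[i] = t[i + 2]
        · rw [if_pos ⟨h2, by rw [hg1]; exact hcond.1, by rw [hgi, hg2]; exact hcond.2⟩]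
          rw [ih (i + 3) (acc ++ [t.getD i ' ']) (by omega)]
          rw [hd1, hd2, hd3, hgi]
          simp only [hcond.1, hcond.2]
          rw [gcol_collapse]
          simp
        · rw [if_neg (by rw [hg1, hgi, hg2]; exact fun hh => hcond ⟨hh.2.1, hh.2.2⟩)]
          rw [ih (i + 1) (acc ++ [t.getD i ' ']) (by omega)]
          rw [hd1, hd2, hd3, hgi]
          have : ¬ (t[i + 1] = 'X' ∧ t[i] = t[i + 2]) := hcond
          simp only [gcol, if_neg this]
          simp
      · rw [if_neg (fun hh => h2 hh.1)]
        rw [ih (i + 1) (acc ++ [t.getD i ' ']) (by omega)]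
        rw [hd1, hgi, gcol_short _ (by simp; omega)]
        simp
        rw [gcol_short _ (by simp; omega)]
    · rw [hcLoopA, if_neg hi, List.drop_eq_nil_of_le (by omega)]
      simp [gcol]

lemma fold_inv :
    ∀ (s out : List Char) (pend : List Char),
      (pend = [] ∨ (∃ a, pend = [a]) ∨ (∃ a, pend = [a, 'X'])) →
      (s.foldl hcStep (out, pend)).1 ++ (s.foldl hcStep (out, pend)).2
        = out ++ gcol (pend ++ s) := by
  intro s
  induction s with
  | nil =>
    rintro out pend (rfl | ⟨a, rfl⟩ | ⟨a, rfl⟩) <;> simp [gcol]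
  | cons c s' ih =>
    rintro out pend (rfl | ⟨a, rfl⟩ | ⟨a, rfl⟩)
    · simpa [hcStep] using ih out [c] (Or.inr (Or.inl ⟨c, rfl⟩))
    · by_cases hc : c = 'X'
      · subst hc
        simpa [hcStep] using ih out [a, 'X'] (Or.inr (Or.inr ⟨a, rfl⟩))
      · have := ih (out ++ [a]) [c] (Or.inr (Or.inl ⟨c, rfl⟩))
        simp [hcStep, hc, this, gcol_cons_ne a c s' hc]
    · by_cases h1 : c = a
      · subst h1
        have := ih (out ++ [c]) [] (Or.inl rfl)
        simp [hcStep, this, gcol]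
      · by_cases hc : c = 'X'
        · subst hc
          have ha : a ≠ 'X' := fun h => h1 h.symm
          have := ih (out ++ [a]) ['X', 'X'] (Or.inr (Or.inr ⟨'X', rfl⟩))
          simp [hcStep, h1, this, gcol, ha]
        · have := ih (out ++ [a, 'X']) [c] (Or.inr (Or.inl ⟨c, rfl⟩))
          simp [hcStep, h1, hc, this, gcol, show ¬a = c from fun h => h1 h.symm, gcol_cons_ne 'X' c s' hc]

-- ===== VERDICT (by name: the statement is the Claim_ definition above) =====
theorem heuristic_clean_spec : Claim_equal_heuristic_clean := by
  intro text _
  unfold Spec_heuristic_clean heuristic_clean heuristic_clean_alt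
  by_cases h0 : text = ""
  · simp [h0]
  · simp only [h0]
    have key : ∀ l : List Char,
        hcLoopA l 0 [] = (l.foldl hcStep ([], [])).1 ++ (l.foldl hcStep ([], [])).2 := by
      intro l
      rw [hcLoopA_eq l l.length 0 [] (by omega), fold_inv l [] [] (Or.inl rfl)]
      simp
    simp [key]
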